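-- pv_equiv track=rewrite | github.com/peterbikes/100_Python_Projects | 9 - Top 3 Words in Text/top_words_in_text.py | update_list
-- ===== SOURCE A (Python) =====
-- def update_list(splitted, word):
--     i = 0
--     while(i < len(splitted)):
--         if(word == splitted[i]):
--             splitted.pop(i)
--             i = -1
--         i += 1
--     return splitted
-- ===== SOURCE B (Python) =====
-- def update_list(splitted, word):
--     return [w for w in splitted if w != word]
-- ===== Notes on version B (the rewrite author's own statement) =====
-- stated objective: faster
-- what changed: A repeatedly rescans from index 0 after each pop (restart via i = -1), removing occurrences of word one at a time; B is a single-pass list-comprehension filter keeping elements != word (note: A mutates the list in place and returns it, B returns a fresh list; equivalence is about the return value).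
import Mathlib
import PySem

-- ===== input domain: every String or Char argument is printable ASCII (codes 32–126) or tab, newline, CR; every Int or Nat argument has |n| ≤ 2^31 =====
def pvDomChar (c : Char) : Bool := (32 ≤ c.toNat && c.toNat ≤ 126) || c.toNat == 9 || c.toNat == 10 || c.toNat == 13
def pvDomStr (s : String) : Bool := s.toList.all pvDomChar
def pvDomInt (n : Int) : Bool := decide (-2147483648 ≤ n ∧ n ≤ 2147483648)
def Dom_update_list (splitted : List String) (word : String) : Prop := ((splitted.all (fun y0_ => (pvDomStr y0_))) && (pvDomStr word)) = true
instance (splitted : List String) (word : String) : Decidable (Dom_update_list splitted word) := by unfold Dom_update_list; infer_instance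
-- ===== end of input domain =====

-- B replaces A's rescan-from-0-after-each-pop loop by a single-pass filter (O(n) vs O(n^2)).
-- A mutates the list in place and returns it; B returns a fresh list: the equivalence proved is about the return value only.

-- ===== PORT A =====
-- A's while loop: index i; on a match, pop(i) and set i = -1, then i += 1 (i.e. restart at 0);
-- otherwise i += 1. i is only ever 0 or a previous i+1, so it is carried as a Nat.
def update_list_loop (splitted : List String) (word : String) (i : Nat) : List String :=
  if h : i < splitted.length then
    if word == splitted[i] then
      -- splitted.pop(i); i = -1; i += 1  ⇒  restart at 0 on the shortened list
      update_list_loop (splitted.eraseIdx i) word 0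
    else
      update_list_loop splitted word (i + 1)
  else
    splitted
termination_by (splitted.length, splitted.length - i)
decreasing_by
  · have : (splitted.eraseIdx i).length < splitted.length := by
      rw [List.length_eraseIdx_of_lt h]; omega
    exact Prod.Lex.left _ _ this
  · exact Prod.Lex.right _ (by omega)

def update_list (splitted : List String) (word : String) : List String :=
  update_list_loop splitted word 0

-- ===== PORT B =====
def update_list_alt (splitted : List String) (word : String) : List String :=
  splitted.filter (fun w => w != word)

-- ===== PRECONDITION & SPEC =====
def Spec_update_list (splitted : List String) (word : String) (out : List String) : Prop := out = update_list_alt splitted word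
instance (splitted : List String) (word : String) (out : List String) : Decidable (Spec_update_list splitted word out) := by unfold Spec_update_list; infer_instance

-- ===== CLAIM (what is proved, stated in full; the proofs are below) =====
def Claim_equal_update_list : Prop := ∀ (splitted : List String) (word : String), Dom_update_list splitted word → Spec_update_list splitted word (update_list splitted word)

-- ===== LEMMAS AND PROOFS =====

-- Loop invariant: every element strictly before index i differs from word; then the loop
-- computes exactly the filter of the whole list.
theorem update_list_loop_filter (splitted : List String) (word : String) (i : Nat)
    (hpre : ∀ x ∈ splitted.take i, x ≠ word) :
    update_list_loop splitted word i = splitted.filter (fun w => w != word) := by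
  rw [update_list_loop]
  split
  · next h =>
    split
    · next heq =>
      have heq' : splitted[i] = word := (beq_iff_eq.mp heq).symm
      rw [update_list_loop_filter (splitted.eraseIdx i) word 0 (by simp)]
      -- filtering is unaffected by erasing an element equal to word
      have hsp : splitted = splitted.take i ++ splitted[i] :: splitted.drop (i + 1) := by
        rw [List.getElem_cons_drop h, List.take_append_drop]
      conv_rhs => rw [hsp]
      rw [List.eraseIdx_eq_take_drop_succ]
      simp only [List.filter_append, List.filter_cons, heq']
      simp
    · next hne =>
      refine update_list_loop_filter splitted word (i + 1) ?_
      intro x hx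
      rw [List.take_add_one] at hx
      rcases List.mem_append.mp hx with hx' | hx'
      · exact hpre x hx'
      · simp only [List.getElem?_eq_getElem h] at hx'
        simp at hx'
        subst hx'
        exact fun hc => hne (by simp [hc])
  · next h =>
    have hall : ∀ x ∈ splitted, x ≠ word := by
      intro x hx
      exact hpre x (by rwa [List.take_of_length_le (by omega)])
    rw [List.filter_eq_self.mpr (fun a ha => by simpa using hall a ha)]
termination_by (splitted.length, splitted.length - i)
decreasing_by
  all_goals first
    | exact Prod.Lex.right _ (by omega)
    | exact Prod.Lex.left _ _ (by
        rw [List.length_eraseIdx_of_lt (by assumption)]; omega)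

-- ===== VERDICT (by name: the statement is the Claim_ definition above) =====
theorem update_list_spec : Claim_equal_update_list := by
  intro splitted word _
  unfold Spec_update_list update_list update_list_alt
  exact update_list_loop_filter splitted word 0 (by simp)
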